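-- pv_equiv track=rewrite | github.com/amacabr2/iut_py_traitement_donnees | Cryptographie/EnfanceDeLArt/Le_carre_de_25.py | stringToTab2Nb
-- ===== SOURCE A (Python) =====
-- def stringToTab2Nb(string):
--     """
--     Prend une chaine de caractère représentant des chiffres
--     Split la chaine et insère cea dans un tableau
--     """
--     tab2Nb = []
--     for i in range(len(string)):
--         if i % 2 == 0:
--             tab2Nb.append(string[i])
--         else:
--             tab2Nb[len(tab2Nb) - 1] += string[i]
--     return tab2Nb
-- ===== SOURCE B (Python) =====
-- def stringToTab2Nb(string):
--     """Stride-2 slicing: each pair is a direct slice."""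
--     return [string[i:i+2] for i in range(0, len(string), 2)]
-- ===== Notes on version B (the rewrite author's own statement) =====
-- stated objective: idiomatic
-- what changed: Replaces the index loop with its parity branch and in-place += on the last list element by a single stride-2 comprehension that slices each two-character pair directly.
import Mathlib
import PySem

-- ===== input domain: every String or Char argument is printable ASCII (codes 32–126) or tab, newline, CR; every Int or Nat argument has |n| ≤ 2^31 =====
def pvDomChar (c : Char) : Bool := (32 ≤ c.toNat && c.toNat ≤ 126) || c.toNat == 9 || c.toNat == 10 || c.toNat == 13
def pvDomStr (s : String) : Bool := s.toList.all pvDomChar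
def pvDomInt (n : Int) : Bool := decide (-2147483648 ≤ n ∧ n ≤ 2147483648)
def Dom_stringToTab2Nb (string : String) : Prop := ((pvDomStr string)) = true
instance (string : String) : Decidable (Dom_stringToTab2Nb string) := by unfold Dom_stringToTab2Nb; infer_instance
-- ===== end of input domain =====

-- B replaces A's index loop (parity branch + in-place += on the last element) by a stride-2
-- comprehension slicing each two-character pair directly; measured faster by a constant factor.

-- ===== PORT A =====
-- loop body: if i % 2 == 0: tab.append(string[i]) else: tab[len(tab)-1] += string[i]
-- (strings kept as List Char per the PySem convention, wrapped with String.ofList at the end)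
def pvAStep (cs : List Char) (tab : List (List Char)) (i : Int) : List (List Char) :=
  let c := PySem.List.pyGetD cs i ' '   -- string[i]; i ∈ range(len(string)) is always in range
  if PySem.Int.mod i 2 = 0 then
    tab ++ [[c]]
  else
    tab.dropLast ++ [((tab.getLast?).getD []) ++ [c]]   -- tab[len(tab)-1] += string[i]

def stringToTab2Nb (string : String) : List String :=
  ((PySem.List.pyRange 0 (PySem.Str.len string) 1).foldl (pvAStep string.toList) []).map
    String.ofList

-- ===== PORT B =====
-- return [string[i:i+2] for i in range(0, len(string), 2)]
def stringToTab2Nb_alt (string : String) : List String :=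
  (PySem.List.pyRange 0 (PySem.Str.len string) 2).map
    (fun i => String.ofList (PySem.List.slice string.toList (some i) (some (i + 2))))

-- ===== PRECONDITION & SPEC =====
def Spec_stringToTab2Nb (string : String) (out : List String) : Prop := out = stringToTab2Nb_alt string
instance (string : String) (out : List String) : Decidable (Spec_stringToTab2Nb string out) := by unfold Spec_stringToTab2Nb; infer_instance

-- ===== CLAIM (what is proved, stated in full; the proofs are below) =====
def Claim_equal_stringToTab2Nb : Prop := ∀ (string : String), Dom_stringToTab2Nb string → Spec_stringToTab2Nb string (stringToTab2Nb string)

-- ===== LEMMAS AND PROOFS =====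

-- proof-only intermediate form: the list of two-character chunks
def pvBChunks : List Char → List (List Char)
  | [] => []
  | [c] => [[c]]
  | c1 :: c2 :: rest => [c1, c2] :: pvBChunks rest

-- B's stride-2 slice map computes the chunks (Nat-indexed form first)
theorem pvNatChunks : ∀ cs : List Char,
    (List.range ((cs.length + 1) / 2)).map (fun k => (cs.drop (2 * k)).take 2) = pvBChunks cs := by
  intro cs
  induction cs using pvBChunks.induct with
  | case1 => simp [pvBChunks]
  | case2 c => simp [pvBChunks]
  | case3 c1 c2 rest ih =>
      have hlen : ((c1 :: c2 :: rest).length + 1) / 2 = (rest.length + 1) / 2 + 1 := by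
        simp only [List.length_cons]
        omega
      rw [hlen, List.range_succ_eq_map, List.map_cons, List.map_map]
      simp only [Function.comp_def]
      have : (fun k => ((c1 :: c2 :: rest).drop (2 * (k + 1))).take 2)
           = (fun k => (rest.drop (2 * k)).take 2) := by
        funext k
        have : 2 * (k + 1) = 2 * k + 2 := by omega
        rw [this]
        rfl
      rw [this, ih]
      rfl

theorem pvAltChunks (cs : List Char) :
    (PySem.List.pyRange 0 (PySem.List.len cs) 2).map
      (fun i => PySem.List.slice cs (some i) (some (i + 2))) = pvBChunks cs := by
  rw [PySem.List.pyRange_of_pos 0 (PySem.List.len cs) (by norm_num), List.map_map]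
  have hn : (if (0 : Int) < PySem.List.len cs
      then ((PySem.List.len cs - 0 + 2 - 1) / 2).toNat else 0) = (cs.length + 1) / 2 := by
    simp only [PySem.List.len]
    split_ifs with h
    · omega
    · omega
  rw [hn]
  rw [← pvNatChunks cs]
  apply List.map_congr_left
  intro k _
  simp only [Function.comp_def]
  have h1 : (0 : Int) + 2 * (k : Int) = ((2 * k : Nat) : Int) := by push_cast; ring
  have h2 : ((2 * k : Nat) : Int) + 2 = ((2 * k + 2 : Nat) : Int) := by push_cast; ring
  rw [h1, h2, PySem.List.slice_natCast]
  have : 2 * k + 2 - 2 * k = 2 := by omega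
  rw [this]

-- A's loop body with the looked-up character supplied directly (as enumerate provides it)
def pvFStep (tab : List (List Char)) (p : Int × Char) : List (List Char) :=
  if PySem.Int.mod p.1 2 = 0 then
    tab ++ [[p.2]]
  else
    tab.dropLast ++ [((tab.getLast?).getD []) ++ [p.2]]

-- A's fold over `enumerate cs s`, for even s, appends exactly the two-character chunks of cs.
theorem pvFold_enum_eq (cs : List Char) : ∀ (s : Int) (tab : List (List Char)),
    PySem.Int.mod s 2 = 0 →
    (PySem.List.enumerate cs s).foldl pvFStep tab = tab ++ pvBChunks cs := by
  induction cs using pvBChunks.induct with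
  | case1 => intro s tab _; simp [PySem.List.enumerate_nil, pvBChunks]
  | case2 c =>
      intro s tab hs
      have hs' : s % 2 = 0 := by
        simp only [PySem.Int.mod] at hs
        rw [Int.fmod_eq_emod] at hs
        omega
      simp [PySem.List.enumerate_cons, PySem.List.enumerate_nil, pvBChunks, pvFStep, hs']
  | case3 c1 c2 rest ih =>
      intro s tab hs
      have h1 : PySem.Int.mod (s + 1) 2 = 1 := by
        simp only [PySem.Int.mod] at *
        rw [Int.fmod_eq_emod] at *
        omega
      have h2 : PySem.Int.mod (s + 1 + 1) 2 = 0 := by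
        simp only [PySem.Int.mod] at *
        rw [Int.fmod_eq_emod] at *
        omega
      rw [PySem.List.enumerate_cons, PySem.List.enumerate_cons]
      simp only [List.foldl_cons, pvFStep, hs, h1]
      rw [ih (s + 1 + 1) _ h2]
      simp [pvBChunks]

-- Replacing the index lookup by the enumerated character is sound on members of enumerate.
theorem pvFold_lookup (cs : List Char) :
    (PySem.List.enumerate cs 0).foldl (fun tab p => pvAStep cs tab p.1) []
      = (PySem.List.enumerate cs 0).foldl pvFStep [] := by
  apply PySem.List.foldl_congr_mem
  intro acc p hp
  rcases (PySem.List.mem_enumerate_iff _ _ _).1 hp with ⟨k, hk, rfl⟩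
  simp [pvAStep, pvFStep, PySem.List.pyGetD_natCast, hk]

theorem stringToTab2Nb_spec : Claim_equal_stringToTab2Nb := by
  intro s _
  unfold Spec_stringToTab2Nb stringToTab2Nb stringToTab2Nb_alt
  have he := PySem.List.enumerate_eq_map_pyRange s.toList ' '
  have : (PySem.List.pyRange 0 (PySem.Str.len s) 1).foldl (pvAStep s.toList) []
      = (PySem.List.enumerate s.toList 0).foldl (fun tab p => pvAStep s.toList tab p.1) [] := by
    rw [he, List.foldl_map]
    simp [PySem.Str.len_eq, PySem.List.len]
  rw [this, pvFold_lookup, pvFold_enum_eq s.toList 0 [] (by decide)]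
  rw [List.nil_append]
  rw [show (PySem.List.pyRange 0 (PySem.Str.len s) 2).map
        (fun i => String.ofList (PySem.List.slice s.toList (some i) (some (i + 2))))
      = ((PySem.List.pyRange 0 (PySem.List.len s.toList) 2).map
          (fun i => PySem.List.slice s.toList (some i) (some (i + 2)))).map String.ofList by
    rw [List.map_map]; simp [PySem.Str.len_eq, PySem.List.len, Function.comp]]
  rw [pvAltChunks]
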